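-- pv_equiv track=rewrite | github.com/UdayKiranPadhy/Leetcode | 1680-concatenation-of-consecutive-binary-numbers/1680-concatenation-of-consecutive-binary-numbers.py | concatenatedBinary
-- ===== SOURCE A (Python) =====
-- def concatenatedBinary(n: int) -> int:
--     result = 0
--     length = 0  # number of bits needed for the current number
--     MOD = 10**9 + 7
--     for i in range(1, n + 1):
--         if (i & (i - 1)) == 0:
--             length += 1
--         result = ((result << length) | i) % MOD
--     return result
-- ===== SOURCE B (Python) =====
-- MOD = 10 ** 9 + 7
--
--
-- def _geom(r, k):
--     # (sum_{j<k} r^j mod MOD, sum_{j<k} j * r^(k-1-j) mod MOD) by binary doubling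
--     if k == 0:
--         return (0, 0)
--     if k % 2 == 1:
--         g, h = _geom(r, k - 1)
--         return ((g * r + 1) % MOD, (h * r + (k - 1)) % MOD)
--     m = k // 2
--     g, h = _geom(r, m)
--     p = pow(r, m, MOD)
--     return ((p + 1) * g % MOD, ((p + 1) * h + m * g) % MOD)
--
--
-- def concatenatedBinary(n: int) -> int:
--     # Numbers with the same bit length L form the block [2^(L-1), min(2^L - 1, n)];
--     # each block's contribution is a closed-form weighted geometric sum, O(log^2 n) total.
--     result = 0
--     lo = 1
--     while lo <= n:
--         hi = min(2 * lo - 1, n)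
--         k = hi - lo + 1
--         r = 2 * lo
--         g, h = _geom(r, k)
--         result = (result * pow(r, k, MOD) + lo * g + h) % MOD
--         lo = r
--     return result
-- ===== Notes on version B (the rewrite author's own statement) =====
-- stated objective: faster
-- what changed: Instead of looping over every number 1..n, B groups the numbers by bit length and adds each block's contribution in closed form as a weighted geometric sum computed by binary-doubling recurrences plus modular exponentiation.
import Mathlib
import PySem

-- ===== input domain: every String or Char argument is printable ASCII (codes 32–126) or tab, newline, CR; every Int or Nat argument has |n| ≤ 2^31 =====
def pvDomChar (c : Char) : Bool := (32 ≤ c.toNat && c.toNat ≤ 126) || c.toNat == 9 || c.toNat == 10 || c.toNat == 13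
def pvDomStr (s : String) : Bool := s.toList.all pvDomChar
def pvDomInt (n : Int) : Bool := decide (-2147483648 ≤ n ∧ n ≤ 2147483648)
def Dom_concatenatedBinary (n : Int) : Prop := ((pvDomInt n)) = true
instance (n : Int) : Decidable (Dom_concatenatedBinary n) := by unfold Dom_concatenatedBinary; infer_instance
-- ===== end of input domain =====

-- B replaces A's per-number O(n) loop by one closed-form weighted geometric sum per
-- bit-length block, evaluated by binary doubling (objective: faster).

-- ===== PORT A =====
-- Literal port of A: fold over range(1, n+1); `length` is a counter starting at 0 and only
-- incremented, so it is carried as a Nat (Python's << then needs a Nat shift amount).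
def concatenatedBinary (n : Int) : Int :=
  ((PySem.List.pyRange 1 (n + 1) 1).foldl
    (fun (st : Int × Nat) i =>
      let length := if PySem.Int.band i (i - 1) = 0 then st.2 + 1 else st.2
      (PySem.Int.mod (PySem.Int.bor (st.1 <<< length) i) 1000000007, length))
    (0, 0)).1

-- ===== PORT B =====
-- _geom(r, k): (sum_{j<k} r^j mod MOD, sum_{j<k} j*r^(k-1-j) mod MOD) by binary doubling.
-- k is the Nat-valued count of a block; `%` on the nonnegative intermediates is Int.emod,
-- which agrees with Python's % for a positive modulus; pow(r, m, MOD) is PySem.Int.powMod.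
def pvGeom (r : Int) (k : Nat) : Int × Int :=
  if k = 0 then (0, 0)
  else if k % 2 = 1 then
    let gh := pvGeom r (k - 1)
    ((gh.1 * r + 1) % 1000000007, (gh.2 * r + ((k : Int) - 1)) % 1000000007)
  else
    let m := k / 2
    let gh := pvGeom r m
    let p := PySem.Int.powMod r m 1000000007
    (((p + 1) * gh.1) % 1000000007, ((p + 1) * gh.2 + (m : Int) * gh.1) % 1000000007)
decreasing_by all_goals omega

-- the while loop of B; fuel only makes the recursion total (lo doubles from 1, so
-- n.toNat + 1 iterations are always enough)
def pvBLoop (fuel : Nat) (n result lo : Int) : Int :=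
  match fuel with
  | 0 => result
  | fuel + 1 =>
    if lo ≤ n then
      let hi := min (2 * lo - 1) n
      let k := hi - lo + 1
      let r := 2 * lo
      let gh := pvGeom r k.toNat
      pvBLoop fuel n
        ((result * PySem.Int.powMod r k.toNat 1000000007 + lo * gh.1 + gh.2) % 1000000007) r
    else result

def concatenatedBinary_alt (n : Int) : Int :=
  pvBLoop (n.toNat + 1) n 0 1

-- ===== PRECONDITION & SPEC =====
def Spec_concatenatedBinary (n : Int) (out : Int) : Prop := out = concatenatedBinary_alt n
instance (n : Int) (out : Int) : Decidable (Spec_concatenatedBinary n out) := by unfold Spec_concatenatedBinary; infer_instance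

-- ===== CLAIM (what is proved, stated in full; the proofs are below) =====
def Claim_equal_concatenatedBinary : Prop := ∀ (n : Int), Dom_concatenatedBinary n → Spec_concatenatedBinary n (concatenatedBinary n)

-- ===== LEMMAS AND PROOFS =====

-- the modulus, over ℕ
def MM : Nat := 1000000007

-- exact (unreduced) value of the concatenation of 1..m in binary
def catN : Nat → Nat
  | 0 => 0
  | m + 1 => catN m * 2 ^ Nat.size (m + 1) + (m + 1)

-- exact geometric sums: gxN r k = Σ_{j<k} r^j, hxN r k = Σ_{j<k} j·r^(k-1-j)
def gxN (r : Nat) : Nat → Nat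
  | 0 => 0
  | k + 1 => gxN r k * r + 1

def hxN (r : Nat) : Nat → Nat
  | 0 => 0
  | k + 1 => hxN r k * r + k

lemma gxN_add (r a b : Nat) : gxN r (a + b) = gxN r a * r ^ b + gxN r b := by
  induction b with
  | zero => simp [gxN]
  | succ b ih =>
    rw [show a + (b + 1) = (a + b) + 1 by omega, gxN, ih, gxN, Nat.pow_succ]; ring

lemma hxN_add (r a b : Nat) :
    hxN r (a + b) = hxN r a * r ^ b + (a * gxN r b + hxN r b) := by
  induction b with
  | zero => simp [hxN, gxN]
  | succ b ih =>
    rw [show a + (b + 1) = (a + b) + 1 by omega, hxN, ih, gxN, hxN, Nat.pow_succ]; ring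

-- the top bit of a number in [2^k, 2^(k+1)) is set
lemma pvTopBit (x k : Nat) (h1 : 2 ^ k ≤ x) (h2 : x < 2 ^ (k + 1)) : x.testBit k = true := by
  rw [Nat.testBit_eq_decide_div_mod_eq]
  have : x / 2 ^ k = 1 := Nat.div_eq_of_lt_le (by omega) (by rw [Nat.pow_succ] at h2; omega)
  simp [this]

lemma pvPow2_band (L : Nat) : 2 ^ L &&& (2 ^ L - 1) = 0 := by
  apply Nat.eq_of_testBit_eq
  intro i
  simp only [Nat.testBit_land, Nat.testBit_two_pow, Nat.testBit_two_pow_sub_one,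
    Nat.zero_testBit, Bool.and_eq_false_iff]
  by_cases h : L = i
  · right; simp [h]
  · left; simp [h]

lemma pvNonpow2_band (m : Nat) (hm : ∀ L, m + 1 ≠ 2 ^ L) : (m + 1) &&& m ≠ 0 := by
  set s := Nat.size (m + 1) with hs
  have hs1 : 1 ≤ s := by
    have : Nat.size (m + 1) ≠ 0 := by simp [Nat.size_eq_zero]
    omega
  have hlt : m + 1 < 2 ^ s := Nat.lt_size_self (m + 1)
  have hge : 2 ^ (s - 1) ≤ m + 1 := by
    by_contra h
    have := Nat.size_le.mpr (by omega : m + 1 < 2 ^ (s - 1))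
    omega
  have hne : m + 1 ≠ 2 ^ (s - 1) := hm (s - 1)
  have hgm : 2 ^ (s - 1) ≤ m := by omega
  have hs2 : s - 1 + 1 = s := by omega
  have hb1 : (m + 1).testBit (s - 1) = true := pvTopBit _ _ hge (by rw [hs2]; exact hlt)
  have hb2 : m.testBit (s - 1) = true := pvTopBit _ _ hgm (by rw [hs2]; omega)
  intro h0
  have := congrArg (fun x => Nat.testBit x (s - 1)) h0
  simp [hb1, hb2, Nat.zero_testBit] at this

lemma pvSize_two_pow_sub_one (L : Nat) : Nat.size (2 ^ L - 1) = L := by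
  cases L with
  | zero => simp [Nat.size_zero]
  | succ L =>
    have h1 : (2:Nat) ^ L ≤ 2 ^ (L + 1) - 1 := by
      have : (2:Nat) ^ (L + 1) = 2 ^ L * 2 := Nat.pow_succ ..
      have hp : 0 < (2:Nat) ^ L := Nat.pow_pos (by omega)
      omega
    have h2 : Nat.size (2 ^ (L + 1) - 1) ≤ L + 1 := by
      apply Nat.size_le.mpr
      have hp : 0 < (2:Nat) ^ (L + 1) := Nat.pow_pos (by omega)
      omega
    have h3 : L + 1 ≤ Nat.size (2 ^ (L + 1) - 1) := by
      calc L + 1 = Nat.size (2 ^ L) := Nat.size_pow.symm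
        _ ≤ _ := Nat.size_le_size h1
    omega

-- every i in [2^L, 2^(L+1)) has bit length L+1
lemma pvSize_block {L i : Nat} (h1 : 2 ^ L ≤ i) (h2 : i < 2 ^ (L + 1)) :
    Nat.size i = L + 1 := by
  have ha : Nat.size i ≤ L + 1 := Nat.size_le.mpr h2
  have hb : L + 1 ≤ Nat.size i := by
    calc L + 1 = Nat.size (2 ^ L) := Nat.size_pow.symm
      _ ≤ _ := Nat.size_le_size h1
  omega

-- A's power-of-two test drives exactly the bit-length bookkeeping
lemma pvSize_step_pow (m : Nat) (h : (m + 1) &&& m = 0) :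
    Nat.size (m + 1) = Nat.size m + 1 := by
  by_cases hp : ∃ L, m + 1 = 2 ^ L
  · obtain ⟨L, hL⟩ := hp
    have hm : m = 2 ^ L - 1 := by omega
    rw [hL, hm, Nat.size_pow, pvSize_two_pow_sub_one]
  · exact absurd h (pvNonpow2_band m (fun L hL => hp ⟨L, hL⟩))

lemma pvSize_step_npow (m : Nat) (h : (m + 1) &&& m ≠ 0) :
    Nat.size (m + 1) = Nat.size m := by
  have hp : ∀ L, m + 1 ≠ 2 ^ L := by
    intro L hL
    apply h
    rw [hL, show m = 2 ^ L - 1 by omega]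
    exact pvPow2_band L
  have h1 : m + 1 < 2 ^ Nat.size m := by
    have := Nat.lt_size_self m
    have := hp (Nat.size m)
    omega
  have ha : Nat.size (m + 1) ≤ Nat.size m := Nat.size_le.mpr h1
  have hb : Nat.size m ≤ Nat.size (m + 1) := Nat.size_le_size (by omega)
  omega

-- shift-or is multiply-add when the low bits are free
lemma pvShiftOr : ∀ (L a b : Nat), b < 2 ^ L → (a <<< L) ||| b = a * 2 ^ L + b := by
  intro L
  induction L with
  | zero =>
    intro a b hb
    have : b = 0 := by omega
    simp [this]
  | succ L ih =>
    intro a b hb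
    have hpow : (2:Nat) ^ (L + 1) = 2 * 2 ^ L := by rw [Nat.pow_succ]; ring
    have hb2 : b / 2 < 2 ^ L := by omega
    have h1 : a <<< (L + 1) = Nat.bit false (a <<< L) := by
      simp [Nat.bit, Nat.shiftLeft_succ, Nat.mul_comm]
    have hsplit : a * 2 ^ (L + 1) + b = 2 * (a * 2 ^ L) + b := by rw [hpow]; ring
    rcases Nat.mod_two_eq_zero_or_one b with h | h
    · have h2 : b = Nat.bit false (b / 2) := by simp [Nat.bit]; omega
      conv_lhs => rw [h1, h2]
      rw [Nat.lor_bit, ih _ _ hb2, hsplit]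
      simp [Nat.bit]
      omega
    · have h2 : b = Nat.bit true (b / 2) := by simp [Nat.bit]; omega
      conv_lhs => rw [h1, h2]
      rw [Nat.lor_bit, ih _ _ hb2, hsplit]
      simp [Nat.bit]
      omega

-- Python % 1000000007 of a cast Nat
lemma pvModBig (x : Nat) : PySem.Int.mod (x : Int) 1000000007 = ((x % MM : Nat) : Int) := by
  have : (1000000007 : Int) = ((MM : Nat) : Int) := by norm_num [MM]
  rw [this, PySem.Int.mod_natCast]

lemma pvEmodBig (x : Nat) : ((x : Int) % 1000000007) = ((x % MM : Nat) : Int) := by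
  have : (1000000007 : Int) = ((MM : Nat) : Int) := by norm_num [MM]
  rw [this]
  push_cast
  rfl

lemma pvPowModBig (r : Nat) (k : Nat) :
    PySem.Int.powMod (r : Int) k 1000000007 = ((r ^ k % MM : Nat) : Int) := by
  unfold PySem.Int.powMod
  rw [show ((r : Int) ^ k) = ((r ^ k : Nat) : Int) by push_cast; ring, pvModBig]

-- correctness of the doubling recursion against the exact sums
lemma pvGeom_eq (r : Nat) (k : Nat) :
    pvGeom (r : Int) k = (((gxN r k % MM : Nat) : Int), ((hxN r k % MM : Nat) : Int)) := by
  induction k using Nat.strong_induction_on with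
  | _ k ih =>
    by_cases h0 : k = 0
    · subst h0; simp [pvGeom, gxN, hxN]
    · by_cases h1 : k % 2 = 1
      · rw [pvGeom]
        simp only [if_neg h0, if_pos h1]
        rw [ih (k - 1) (by omega)]
        obtain ⟨j, hj⟩ : ∃ j, k = j + 1 := ⟨k - 1, by omega⟩
        subst hj
        simp only [Nat.add_sub_cancel]
        refine Prod.ext ?_ ?_ <;> dsimp only
        · rw [show ((gxN r j % MM : Nat) : Int) * r + 1
                = (((gxN r j % MM) * r + 1 : Nat) : Int) by push_cast; ring, pvEmodBig]
          norm_cast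
          rw [show gxN r (j + 1) = gxN r j * r + 1 from rfl]
          exact ((Nat.mod_modEq (gxN r j) MM).mul_right r).add_right 1
        · rw [show ((hxN r j % MM : Nat) : Int) * r + ((((j + 1) : Nat) : Int) - 1)
                = (((hxN r j % MM) * r + j : Nat) : Int) by push_cast; ring, pvEmodBig]
          norm_cast
          rw [show hxN r (j + 1) = hxN r j * r + j from rfl]
          exact ((Nat.mod_modEq (hxN r j) MM).mul_right r).add_right j
      · rw [pvGeom]
        simp only [if_neg h0, if_neg h1]
        have hm : k / 2 + k / 2 = k := by omega
        rw [ih (k / 2) (by omega), pvPowModBig]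
        set m := k / 2 with hmdef
        refine Prod.ext ?_ ?_ <;> dsimp only
        · rw [show (((r ^ m % MM : Nat) : Int) + 1) * ((gxN r m % MM : Nat) : Int)
                = ((((r ^ m % MM) + 1) * (gxN r m % MM) : Nat) : Int) by push_cast; ring, pvEmodBig]
          norm_cast
          calc ((r ^ m % MM + 1) * (gxN r m % MM)) % MM
              = ((r ^ m + 1) * gxN r m) % MM :=
                ((Nat.mod_modEq (r ^ m) MM).add_right 1).mul (Nat.mod_modEq (gxN r m) MM)
            _ = gxN r k % MM := by rw [← hm, gxN_add]; ring_nf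
        · rw [show (((r ^ m % MM : Nat) : Int) + 1) * ((hxN r m % MM : Nat) : Int)
                + ((m : Nat) : Int) * ((gxN r m % MM : Nat) : Int)
                = ((((r ^ m % MM) + 1) * (hxN r m % MM) + m * (gxN r m % MM) : Nat) : Int) by push_cast; ring, pvEmodBig]
          norm_cast
          calc ((r ^ m % MM + 1) * (hxN r m % MM) + m * (gxN r m % MM)) % MM
              = ((r ^ m + 1) * hxN r m + m * gxN r m) % MM :=
                (((Nat.mod_modEq (r ^ m) MM).add_right 1).mul (Nat.mod_modEq (hxN r m) MM)).add
                  ((Nat.ModEq.refl m).mul (Nat.mod_modEq (gxN r m) MM))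
            _ = hxN r k % MM := by rw [← hm, hxN_add]; ring_nf

-- concatenating one block of k numbers a+1, …, a+k of constant bit length L
lemma pvCat_block (a k L : Nat) (h : ∀ j, 1 ≤ j → j ≤ k → Nat.size (a + j) = L) :
    catN (a + k) = catN a * (2 ^ L) ^ k + ((a + 1) * gxN (2 ^ L) k + hxN (2 ^ L) k) := by
  induction k with
  | zero => simp [gxN, hxN]
  | succ k ih =>
    have hk : ∀ j, 1 ≤ j → j ≤ k → Nat.size (a + j) = L := fun j h1 h2 => h j h1 (by omega)
    have hs : Nat.size (a + (k + 1)) = L := h (k + 1) (by omega) (le_refl _)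
    show catN (a + k + 1) = _
    rw [catN, show a + k + 1 = a + (k + 1) by omega, hs, ih hk, gxN, hxN, Nat.pow_succ]
    ring

-- the A fold computes (catN m % MM, size m)
lemma pvA_fold (m : Nat) :
    ((PySem.List.pyRange 1 ((m : Int) + 1) 1).foldl
      (fun (st : Int × Nat) i =>
        let length := if PySem.Int.band i (i - 1) = 0 then st.2 + 1 else st.2
        (PySem.Int.mod (PySem.Int.bor (st.1 <<< length) i) 1000000007, length))
      (0, 0)) = (((catN m % MM : Nat) : Int), Nat.size m) := by
  induction m with
  | zero =>
    rw [PySem.List.pyRange_one_eq_nil (by norm_num)]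
    simp [catN, Nat.size_zero, MM]
  | succ m ih =>
    have hc : ((m + 1 : Nat) : Int) + 1 = ((m : Int) + 1) + 1 := by push_cast; ring
    rw [hc, PySem.List.pyRange_one_succ_right (by omega), List.foldl_append, ih]
    simp only [List.foldl_cons, List.foldl_nil]
    have hi : ((m : Int) + 1) = ((m + 1 : Nat) : Int) := by push_cast; ring
    have hi1 : ((m : Int) + 1) - 1 = ((m : Nat) : Int) := by ring
    rw [hi1]
    conv_lhs => rw [hi]
    rw [PySem.Int.band_natCast]
    have hlt : m + 1 < 2 ^ Nat.size (m + 1) := Nat.lt_size_self (m + 1)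
    by_cases hb : (m + 1) &&& m = 0
    · have hsz : Nat.size (m + 1) = Nat.size m + 1 := pvSize_step_pow m hb
      rw [if_pos (by exact_mod_cast congrArg (Nat.cast : Nat → Int) hb), ← hsz]
      rw [show ((catN m % MM : Nat) : Int) <<< Nat.size (m + 1)
            = (((catN m % MM) <<< Nat.size (m + 1) : Nat) : Int) by simp]
      rw [PySem.Int.bor_natCast, pvModBig, pvShiftOr _ _ _ hlt]
      refine Prod.ext ?_ rfl
      dsimp only
      norm_cast
      rw [show catN (m + 1) = catN m * 2 ^ Nat.size (m + 1) + (m + 1) from rfl]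
      exact ((Nat.mod_modEq (catN m) MM).mul_right _).add_right _
    · have hsz : Nat.size (m + 1) = Nat.size m := pvSize_step_npow m hb
      rw [if_neg (by exact_mod_cast fun h => hb (by exact_mod_cast h)), ← hsz]
      rw [show ((catN m % MM : Nat) : Int) <<< Nat.size (m + 1)
            = (((catN m % MM) <<< Nat.size (m + 1) : Nat) : Int) by simp]
      rw [PySem.Int.bor_natCast, pvModBig, pvShiftOr _ _ _ hlt]
      refine Prod.ext ?_ rfl
      dsimp only
      norm_cast
      rw [show catN (m + 1) = catN m * 2 ^ Nat.size (m + 1) + (m + 1) from rfl]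
      exact ((Nat.mod_modEq (catN m) MM).mul_right _).add_right _

lemma pvA_eq (n : Int) : concatenatedBinary n = ((catN n.toNat % MM : Nat) : Int) := by
  unfold concatenatedBinary
  rcases le_or_gt n 0 with hn | hn
  · rw [PySem.List.pyRange_one_eq_nil (by omega)]
    have : n.toNat = 0 := by omega
    simp [this, catN]
  · have : n = ((n.toNat : Nat) : Int) := by omega
    rw [this, pvA_fold n.toNat]
    simp only [Int.toNat_natCast]

lemma pvB_loop (fuel : Nat) : ∀ (L : Nat) (n : Int),
    (n + 1 - ((2 ^ L : Nat) : Int)).toNat ≤ fuel →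
    pvBLoop fuel n ((catN (min (2 ^ L - 1) n.toNat) % MM : Nat) : Int) ((2 ^ L : Nat) : Int)
      = ((catN n.toNat % MM : Nat) : Int) := by
  induction fuel with
  | zero =>
    intro L n hf
    have hP : 1 ≤ 2 ^ L := Nat.one_le_two_pow
    have : min (2 ^ L - 1) n.toNat = n.toNat := by omega
    rw [this, pvBLoop]
  | succ fuel ih =>
    intro L n hf
    by_cases hle : ((2 ^ L : Nat) : Int) ≤ n
    · simp only [pvBLoop, if_pos hle]
      set P : Nat := 2 ^ L with hPdef
      have hP1 : 1 ≤ P := Nat.one_le_two_pow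
      have hn0 : 0 ≤ n := le_trans (by positivity) hle
      have hPn : P ≤ n.toNat := by omega
      have hmin : min (P - 1) n.toNat = P - 1 := by omega
      rw [hmin]
      set a : Nat := P - 1 with hadef
      set k' : Nat := min (2 * P - 1) n.toNat - a with hkdef
      have hk1 : 1 ≤ k' := by omega
      have hak : a + k' = min (2 * P - 1) n.toNat := by omega
      have h2P : (2 : Int) * ((P : Nat) : Int) = ((2 * P : Nat) : Int) := by push_cast; ring
      have hkto : (min (2 * ((P : Nat) : Int) - 1) n - ((P : Nat) : Int) + 1).toNat = k' := by
        omega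
      rw [hkto, h2P, pvGeom_eq (2 * P) k', pvPowModBig]
      have hcast : ((catN a % MM : Nat) : Int) * (((2 * P) ^ k' % MM : Nat) : Int)
          + ((P : Nat) : Int) * (((gxN (2 * P) k' % MM : Nat) : Int), ((hxN (2 * P) k' % MM : Nat) : Int)).1
          + (((gxN (2 * P) k' % MM : Nat) : Int), ((hxN (2 * P) k' % MM : Nat) : Int)).2
          = (((catN a % MM) * ((2 * P) ^ k' % MM) + P * (gxN (2 * P) k' % MM)
              + hxN (2 * P) k' % MM : Nat) : Int) := by
        dsimp only
        push_cast
        ring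
      rw [hcast, pvEmodBig]
      have hpow2 : 2 * P = 2 ^ (L + 1) := by rw [hPdef, Nat.pow_succ]; ring
      have hsizes : ∀ j, 1 ≤ j → j ≤ k' → Nat.size (a + j) = L + 1 := by
        intro j h1 h2
        apply pvSize_block
        · omega
        · rw [← hpow2]; omega
      have hval : ((catN a % MM) * ((2 * P) ^ k' % MM) + P * (gxN (2 * P) k' % MM)
            + hxN (2 * P) k' % MM) % MM = catN (a + k') % MM := by
        calc ((catN a % MM) * ((2 * P) ^ k' % MM) + P * (gxN (2 * P) k' % MM)
              + hxN (2 * P) k' % MM) % MM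
            = (catN a * (2 * P) ^ k' + P * gxN (2 * P) k' + hxN (2 * P) k') % MM :=
              ((((Nat.mod_modEq (catN a) MM).mul (Nat.mod_modEq ((2 * P) ^ k') MM)).add
                ((Nat.ModEq.refl P).mul (Nat.mod_modEq (gxN (2 * P) k') MM))).add
                (Nat.mod_modEq (hxN (2 * P) k') MM))
          _ = catN (a + k') % MM := by
              rw [hpow2] at *
              rw [pvCat_block a k' (L + 1) hsizes]
              congr 1
              have : a + 1 = 2 ^ L := by omega
              rw [this]
              ring_nf
              rw [hPdef]
              ring_nf
      rw [hval]
      have hnext : a + k' = min (2 ^ (L + 1) - 1) n.toNat := by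
        rw [hak, ← hpow2]
      rw [hnext, show ((2 * P : Nat) : Int) = ((2 ^ (L + 1) : Nat) : Int) by rw [hpow2]]
      apply ih (L + 1) n
      have hc1 : ((2 ^ (L + 1) : Nat) : Int) = 2 * ((2 ^ L : Nat) : Int) := by
        push_cast [Nat.pow_succ]
        ring
      omega
    · simp only [pvBLoop, if_neg hle]
      have hP : 1 ≤ 2 ^ L := Nat.one_le_two_pow
      have : min (2 ^ L - 1) n.toNat = n.toNat := by omega
      rw [this]

lemma pvB_eq (n : Int) : concatenatedBinary_alt n = ((catN n.toNat % MM : Nat) : Int) := by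
  unfold concatenatedBinary_alt
  have h0 : (0 : Int) = ((catN (min (2 ^ 0 - 1) n.toNat) % MM : Nat) : Int) := by
    simp [catN, MM]
  have h1 : (1 : Int) = ((2 ^ 0 : Nat) : Int) := by norm_num
  rw [h0, h1]
  apply pvB_loop
  simp only [pow_zero, Nat.cast_one]
  omega

-- ===== VERDICT (by name: the statement is the Claim_ definition above) =====
theorem concatenatedBinary_spec : Claim_equal_concatenatedBinary := by
  intro n _
  unfold Spec_concatenatedBinary
  rw [pvA_eq, pvB_eq]
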